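-- pv_equiv track=rewrite | github.com/Ymgc19/pbl_basic | PBLBasic04/minus.py | contains_minus
-- ===== SOURCE A (Python) =====
-- def contains_minus(values):
--     x = 1
--     for _ in values:
--         if _ < 0:
--             x *= 0
--     if x == 0:
--         return True
--     return False
-- ===== SOURCE B (Python) =====
-- def contains_minus(values):
--     return min(values, default=0) < 0
-- ===== Notes on version B (the rewrite author's own statement) =====
-- stated objective: simpler
-- what changed: Replaces the flag-multiplication loop (x *= 0 on each negative, then test x == 0) with a one-line aggregate: take the minimum of the list (default 0 for empty input) and compare it to 0.
import Mathlib
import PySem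

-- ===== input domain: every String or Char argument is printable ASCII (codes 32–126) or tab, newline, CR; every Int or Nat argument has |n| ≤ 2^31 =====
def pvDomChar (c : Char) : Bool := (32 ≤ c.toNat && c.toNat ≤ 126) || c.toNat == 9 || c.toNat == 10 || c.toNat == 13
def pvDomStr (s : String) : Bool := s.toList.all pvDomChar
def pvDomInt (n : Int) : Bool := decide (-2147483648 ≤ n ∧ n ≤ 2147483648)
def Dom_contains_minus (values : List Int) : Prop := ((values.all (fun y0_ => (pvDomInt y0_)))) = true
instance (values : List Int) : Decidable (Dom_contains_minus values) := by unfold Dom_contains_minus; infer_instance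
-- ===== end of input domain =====

-- ===== PORT A =====
-- B: one aggregate minimum (default 0) compared to 0, instead of A's flag loop.
def contains_minus (values : List Int) : Bool :=
  let x := values.foldl (fun x v => if v < 0 then x * 0 else x) (1 : Int)
  if x == 0 then true else false

-- ===== PORT B =====
-- min(values, default=0) < 0 ; Python min = first-extremal fold, default when empty
def contains_minus_alt (values : List Int) : Bool :=
  decide ((match values with
    | [] => 0
    | v :: vs => vs.foldl (fun m v => if v < m then v else m) v) < 0)

-- ===== PRECONDITION & SPEC =====
def Spec_contains_minus (values : List Int) (out : Bool) : Prop := out = contains_minus_alt values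
instance (values : List Int) (out : Bool) : Decidable (Spec_contains_minus values out) := by unfold Spec_contains_minus; infer_instance

-- ===== CLAIM (what is proved, stated in full; the proofs are below) =====
def Claim_equal_contains_minus : Prop := ∀ (values : List Int), Dom_contains_minus values → Spec_contains_minus values (contains_minus values)

-- ===== LEMMAS AND PROOFS =====

-- A's flag stays 0 once it is 0.
theorem A_zero (vs : List Int) :
    vs.foldl (fun x v => if v < 0 then x * 0 else x) (0 : Int) = 0 := by
  induction vs with
  | nil => rfl
  | cons v vs ih => rw [List.foldl_cons]; split <;> simpa using ih

-- A's loop: starting from a nonzero flag, the flag ends 0 iff some element is negative.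
theorem A_loop_char (vs : List Int) : ∀ x : Int, x ≠ 0 →
    (vs.foldl (fun x v => if v < 0 then x * 0 else x) x == 0)
      = vs.any (fun w => decide (w < 0)) := by
  induction vs with
  | nil => intro x hx; simp [hx]
  | cons v vs ih =>
    intro x hx
    rw [List.foldl_cons, List.any_cons]
    by_cases h : v < 0
    · rw [if_pos h, mul_zero, A_zero]
      simp [h]
    · rw [if_neg h, ih x hx]
      simp [h]

-- B's running minimum is ≤ its seed.
theorem B_min_le_seed (vs : List Int) : ∀ v : Int,
    vs.foldl (fun m v => if v < m then v else m) v ≤ v := by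
  induction vs with
  | nil => intro v; exact le_refl v
  | cons u us ih =>
    intro v
    rw [List.foldl_cons]
    refine le_trans (ih _) ?_
    split <;> omega

-- B's running minimum is ≤ every scanned element.
theorem B_min_le (vs : List Int) : ∀ v w : Int, w ∈ vs →
    vs.foldl (fun m v => if v < m then v else m) v ≤ w := by
  induction vs with
  | nil => intro v w hw; simp at hw
  | cons u us ih =>
    intro v w hw
    rw [List.foldl_cons]
    rcases List.mem_cons.mp hw with rfl | hw'
    · refine le_trans (B_min_le_seed us _) ?_
      split <;> omega
    · exact ih _ w hw'

-- B's running minimum is the seed or one of the scanned elements.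
theorem B_min_mem (vs : List Int) : ∀ v : Int,
    vs.foldl (fun m v => if v < m then v else m) v ∈ v :: vs := by
  induction vs with
  | nil => intro v; exact List.mem_cons_self
  | cons u us ih =>
    intro v
    rw [List.foldl_cons]
    have h := ih (if u < v then u else v)
    rcases List.mem_cons.mp h with heq | hmem
    · rw [heq]
      split
      · exact List.mem_cons_of_mem _ List.mem_cons_self
      · exact List.mem_cons_self
    · exact List.mem_cons_of_mem _ (List.mem_cons_of_mem _ hmem)

-- ===== VERDICT (by name: the statement is the Claim_ definition above) =====
theorem contains_minus_spec : Claim_equal_contains_minus := by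
  intro values _
  unfold Spec_contains_minus contains_minus contains_minus_alt
  cases values with
  | nil => decide
  | cons v vs =>
    simp only [A_loop_char (v :: vs) 1 one_ne_zero]
    by_cases h : ∃ w ∈ v :: vs, w < 0
    · have h1 : (v :: vs).any (fun w => decide (w < 0)) = true := by
        simpa [List.any_eq_true] using h
      rw [h1]
      rcases h with ⟨w, hw, hwlt⟩
      have hle : vs.foldl (fun m v => if v < m then v else m) v ≤ w := by
        rcases List.mem_cons.mp hw with rfl | hw'
        · exact B_min_le_seed vs w
        · exact B_min_le vs v w hw'
      have hneg : vs.foldl (fun m v => if v < m then v else m) v < 0 := by omega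
      simp [hneg]
    · have h1 : (v :: vs).any (fun w => decide (w < 0)) = false := by
        simpa [List.any_eq_true] using h
      rw [h1]
      push Not at h
      have hmem := B_min_mem vs v
      have hge := h _ hmem
      simp [hge]
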